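-- pv_equiv track=rewrite | github.com/kfigon/SymulatorMcCdma | przeplot.py | _przeplotInternal
-- ===== SOURCE A (Python) =====
-- def _przeplotInternal(dane, krok):
--     out = []
--     dl = len(dane)
--     for i in range(krok):
--         j = i
--         while(j < dl):
--             out.append(dane[j])
--             j += krok
--
--     return out
-- ===== SOURCE B (Python) =====
-- def _przeplotInternal(dane, krok):
--     if krok <= 0:
--         return []
--     buckets = [[] for _ in range(krok)]
--     for idx, v in enumerate(dane):
--         buckets[idx % krok].append(v)
--     out = []
--     for b in buckets:
--         out.extend(b)
--     return out
-- ===== Notes on version B (the rewrite author's own statement) =====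
-- stated objective: alternative
-- what changed: A makes krok separate strided passes over dane (outer loop over offsets, inner while jumping by krok); B makes one forward pass distributing each element into buckets[idx % krok] and then concatenates the krok buckets.
import Mathlib
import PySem

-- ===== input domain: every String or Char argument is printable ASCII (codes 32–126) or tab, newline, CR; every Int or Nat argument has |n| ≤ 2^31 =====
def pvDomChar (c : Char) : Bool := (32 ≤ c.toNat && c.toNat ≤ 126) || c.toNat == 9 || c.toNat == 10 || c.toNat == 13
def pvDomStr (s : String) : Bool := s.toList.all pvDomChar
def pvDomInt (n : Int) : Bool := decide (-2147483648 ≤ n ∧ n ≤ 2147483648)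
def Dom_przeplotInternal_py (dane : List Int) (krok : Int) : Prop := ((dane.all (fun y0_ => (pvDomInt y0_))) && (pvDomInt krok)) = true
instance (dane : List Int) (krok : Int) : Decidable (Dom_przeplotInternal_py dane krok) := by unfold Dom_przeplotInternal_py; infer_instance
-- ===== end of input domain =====

-- B replaces A's krok strided scans over dane with a single distribution pass into krok buckets
-- followed by a concatenation (alternative decomposition, same asymptotic cost).

-- ===== PORT A =====
-- the 'while j < dl: out.append(dane[j]); j += krok' loop; fuel bounds the iteration count
-- (dane.length iterations suffice since krok ≥ 1 whenever the loop is entered)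
def przeplotA_inner (dane : List Int) (krok : Int) : Int → Nat → List Int
  | _, 0 => []
  | j, fuel + 1 =>
    if j < (dane.length : Int) then
      PySem.List.pyGetD dane j 0 :: przeplotA_inner dane krok (j + krok) fuel
    else []

def przeplotInternal_py (dane : List Int) (krok : Int) : List Int :=
  (PySem.List.pyRange 0 krok 1).foldl
    (fun out i => out ++ przeplotA_inner dane krok i dane.length) []

-- ===== PORT B =====
def przeplotInternal_py_alt (dane : List Int) (krok : Int) : List Int :=
  if krok ≤ 0 then []
  else
    (dane.zipIdx.foldl
        (fun bs p => bs.modify (p.2 % krok.toNat) (· ++ [p.1]))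
        (List.replicate krok.toNat [])).foldl (fun out b => out ++ b) []

-- ===== PRECONDITION & SPEC =====
def Spec_przeplotInternal_py (dane : List Int) (krok : Int) (out : List Int) : Prop := out = przeplotInternal_py_alt dane krok
instance (dane : List Int) (krok : Int) (out : List Int) : Decidable (Spec_przeplotInternal_py dane krok out) := by unfold Spec_przeplotInternal_py; infer_instance

-- ===== CLAIM (what is proved, stated in full; the proofs are below) =====
def Claim_equal_przeplotInternal_py : Prop := ∀ (dane : List Int) (krok : Int), Dom_przeplotInternal_py dane krok → Spec_przeplotInternal_py dane krok (przeplotInternal_py dane krok)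

-- ===== LEMMAS AND PROOFS =====

-- common middle form: values of xs at the indices ≥ j congruent to j modulo k (indices offset by n)
def Gaux (k : Nat) (xs : List Int) (n j : Nat) : List Int :=
  ((xs.zipIdx n).filter (fun p => decide (j ≤ p.2) && decide ((p.2 - j) % k = 0))).map (·.1)

lemma stepCond (k j i : Nat) (_hk : 0 < k) (hij : j < i) :
    ((j ≤ i ∧ (i - j) % k = 0)) ↔ ((j + k ≤ i ∧ (i - (j + k)) % k = 0)) := by
  rw [← Nat.dvd_iff_mod_eq_zero, ← Nat.dvd_iff_mod_eq_zero]
  constructor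
  · rintro ⟨-, hd⟩
    have hle : k ≤ i - j := Nat.le_of_dvd (by omega) hd
    have : i - (j + k) = (i - j) - k := by omega
    exact ⟨by omega, by rw [this]; exact Nat.dvd_sub hd dvd_rfl⟩
  · rintro ⟨hle, hd⟩
    have : i - j = (i - (j + k)) + k := by omega
    exact ⟨by omega, by rw [this]; exact Nat.dvd_add hd dvd_rfl⟩

lemma Gaux_peel (k : Nat) (hk : 0 < k) :
    ∀ (xs : List Int) (n j : Nat), n ≤ j →
      Gaux k xs n j = if j < n + xs.length then xs.getD (j - n) 0 :: Gaux k xs n (j + k) else [] := by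
  intro xs
  induction xs with
  | nil => intro n j hnj; simp [Gaux]; omega
  | cons x xs ih =>
    intro n j hnj
    rcases Nat.eq_or_lt_of_le hnj with h | h
    · subst h
      have hhead : Gaux k (x :: xs) n n =
          x :: ((xs.zipIdx (n + 1)).filter
            (fun p => decide (n ≤ p.2) && decide ((p.2 - n) % k = 0))).map (·.1) := by
        simp [Gaux, List.zipIdx_cons]
      rw [hhead]
      have hcongr : (xs.zipIdx (n + 1)).filter
            (fun p => decide (n ≤ p.2) && decide ((p.2 - n) % k = 0)) =
          (xs.zipIdx (n + 1)).filter
            (fun p => decide (n + k ≤ p.2) && decide ((p.2 - (n + k)) % k = 0)) := by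
        apply List.filter_congr
        intro p hp
        obtain ⟨h1, -, -⟩ := List.mem_zipIdx (x := p.1) (i := p.2) (by simpa using hp)
        have hiff := stepCond k n p.2 hk (by omega)
        rw [Bool.eq_iff_iff]
        simp only [Bool.and_eq_true, decide_eq_true_eq]
        exact hiff
      rw [hcongr]
      have hne : ¬ (n + k ≤ n) := by omega
      have htail : Gaux k (x :: xs) n (n + k) =
          ((xs.zipIdx (n + 1)).filter
            (fun p => decide (n + k ≤ p.2) && decide ((p.2 - (n + k)) % k = 0))).map (·.1) := by
        simp [Gaux, List.zipIdx_cons, hne]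
      rw [← htail]
      simp
    · have hne : ¬ (j ≤ n) := by omega
      have hhead : Gaux k (x :: xs) n j = Gaux k xs (n + 1) j := by
        simp [Gaux, List.zipIdx_cons, hne]
      have hne' : ¬ (j + k ≤ n) := by omega
      have hhead' : Gaux k (x :: xs) n (j + k) = Gaux k xs (n + 1) (j + k) := by
        simp [Gaux, List.zipIdx_cons, hne']
      rw [hhead, ih (n + 1) j (by omega), hhead']
      by_cases hlt : j < n + 1 + xs.length
      · rw [if_pos hlt, if_pos (by simp; omega)]
        have hgd : (x :: xs).getD (j - n) 0 = xs.getD (j - (n + 1)) 0 := by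
          have h1 : j - n = (j - (n + 1)) + 1 := by omega
          simp [h1]
        rw [hgd]
      · rw [if_neg hlt, if_neg (by simp; omega)]

lemma aInner_eq_Gaux (dane : List Int) (k : Nat) (hk : 0 < k) :
    ∀ (fuel : Nat) (j : Nat), dane.length ≤ fuel + j →
      przeplotA_inner dane (k : Int) (j : Int) fuel = Gaux k dane 0 j := by
  intro fuel
  induction fuel with
  | zero =>
    intro j hj
    rw [Gaux_peel k hk dane 0 j (Nat.zero_le _), if_neg (by omega)]
    rfl
  | succ fuel ih =>
    intro j hj
    rw [Gaux_peel k hk dane 0 j (Nat.zero_le _)]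
    simp only [Nat.zero_add]
    by_cases hlt : j < dane.length
    · rw [przeplotA_inner, if_pos (by exact_mod_cast hlt), if_pos hlt]
      have hcast : (j : Int) + (k : Int) = ((j + k : Nat) : Int) := by push_cast; ring
      rw [hcast, ih (j + k) (by omega), PySem.List.pyGetD_natCast]
      simp
    · rw [przeplotA_inner, if_neg (by exact_mod_cast hlt), if_neg hlt]

lemma fold_length (k : Nat) :
    ∀ (ps : List (Int × Nat)) (bs : List (List Int)),
      (ps.foldl (fun b p => b.modify (p.2 % k) (· ++ [p.1])) bs).length = bs.length := by
  intro ps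
  induction ps with
  | nil => intro bs; rfl
  | cons p ps ih => intro bs; rw [List.foldl_cons, ih, List.length_modify]

lemma fold_buckets (k : Nat) :
    ∀ (ps : List (Int × Nat)) (bs : List (List Int)) (r : Nat), r < bs.length →
      (ps.foldl (fun b p => b.modify (p.2 % k) (· ++ [p.1])) bs).getD r [] =
        bs.getD r [] ++ (ps.filter (fun p => decide (p.2 % k = r))).map (·.1) := by
  intro ps
  induction ps with
  | nil => intro bs r _; simp
  | cons p ps ih =>
    intro bs r hr
    rw [List.foldl_cons, ih _ r (by rw [List.length_modify]; exact hr)]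
    have hmod : (bs.modify (p.2 % k) (· ++ [p.1])).getD r [] =
        if p.2 % k = r then bs.getD r [] ++ [p.1] else bs.getD r [] := by
      rw [List.getD_eq_getElem?_getD, List.getElem?_modify, List.getD_eq_getElem?_getD,
        List.getElem?_eq_getElem hr]
      by_cases h : p.2 % k = r <;> simp [h]
    rw [hmod]
    by_cases h : p.2 % k = r <;> simp [h]

lemma map_getD_range (l : List (List Int)) :
    (List.range l.length).map (fun r => l.getD r []) = l := by
  induction l with
  | nil => rfl
  | cons x xs ih =>
    rw [List.length_cons, List.range_succ_eq_map, List.map_cons, List.map_map]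
    have hc : ((fun r => (x :: xs).getD r []) ∘ Nat.succ) = fun r => xs.getD r [] := by
      funext r; simp
    rw [hc, ih]
    simp

lemma modCond (k r i : Nat) (hr : r < k) :
    ((r ≤ i ∧ (i - r) % k = 0)) ↔ i % k = r := by
  rw [← Nat.dvd_iff_mod_eq_zero]
  constructor
  · rintro ⟨hle, ⟨t, ht⟩⟩
    have : i = r + k * t := by omega
    subst this
    rw [Nat.add_mul_mod_self_left, Nat.mod_eq_of_lt hr]
  · intro h
    have hle : r ≤ i := h ▸ Nat.mod_le i k
    refine ⟨hle, ⟨i / k, ?_⟩⟩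
    have := Nat.mod_add_div i k
    omega

lemma Gaux_eq_filter_mod (k : Nat) (xs : List Int) (r : Nat) (hr : r < k) :
    Gaux k xs 0 r = ((xs.zipIdx).filter (fun p => decide (p.2 % k = r))).map (·.1) := by
  unfold Gaux
  congr 1
  apply List.filter_congr
  intro p _
  rw [Bool.eq_iff_iff]
  simp only [Bool.and_eq_true, decide_eq_true_eq]
  exact modCond k r p.2 hr

-- ===== VERDICT (by name: the statement is the Claim_ definition above) =====
theorem przeplotInternal_py_spec : Claim_equal_przeplotInternal_py := by
  intro dane krok _
  unfold Spec_przeplotInternal_py przeplotInternal_py przeplotInternal_py_alt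
  by_cases hk : krok ≤ 0
  · rw [if_pos hk, PySem.List.pyRange_one_eq_nil hk]
    rfl
  · rw [if_neg hk]
    set kn := krok.toNat with hkn
    have hkrok : krok = (kn : Int) := by omega
    have hknpos : 0 < kn := by omega
    -- A side: one strided segment per residue
    rw [PySem.List.foldl_append_eq_flatMap, List.nil_append, hkrok, PySem.List.pyRange_one,
      List.flatMap_map]
    have htoNat : (((kn : Int)) - 0).toNat = kn := by omega
    rw [htoNat]
    have hA : ∀ r ∈ List.range kn,
        przeplotA_inner dane ((kn : Nat) : Int) ((0 : Int) + (r : Int)) dane.length =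
          ((dane.zipIdx).filter (fun p => decide (p.2 % kn = r))).map (·.1) := by
      intro r hrmem
      have hr : r < kn := List.mem_range.mp hrmem
      rw [zero_add, aInner_eq_Gaux dane kn hknpos dane.length r (by omega),
        Gaux_eq_filter_mod kn dane r hr]
    rw [List.flatMap_congr hA, List.flatMap_def]
    -- B side: the final buckets are exactly those residue segments
    rw [PySem.List.foldl_append_eq_flatten, List.nil_append]
    have hlen : (dane.zipIdx.foldl
        (fun bs p => bs.modify (p.2 % kn) (· ++ [p.1])) (List.replicate kn [])).length = kn := by
      rw [fold_length, List.length_replicate]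
    have hB : dane.zipIdx.foldl
        (fun bs p => bs.modify (p.2 % kn) (· ++ [p.1])) (List.replicate kn []) =
        (List.range kn).map
          (fun r => ((dane.zipIdx).filter (fun p => decide (p.2 % kn = r))).map (·.1)) := by
      have hmr := map_getD_range (dane.zipIdx.foldl
        (fun bs p => bs.modify (p.2 % kn) (· ++ [p.1])) (List.replicate kn []))
      rw [hlen] at hmr
      rw [← hmr]
      apply List.map_congr_left
      intro r hrmem
      rw [fold_buckets kn dane.zipIdx (List.replicate kn []) r
        (by rw [List.length_replicate]; exact List.mem_range.mp hrmem)]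
      simp
    rw [hB]
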